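-- pv_equiv track=rewrite | github.com/Fozil767/Python | lesson-6/homework/hw6.py | insert_underscore
-- ===== SOURCE A (Python) =====
-- def insert_underscore(txt):
--     vowels = 'aeiouAEIOU'
--     result = ''
--     i = 0
--     count = 0
--
--     while i < len(txt):
--         result += txt[i]
--         count += 1
--
--         # Har uchinchi belgidan so'ng underscore qo'shish
--         if count == 3:
--             # Keyingi belgini tekshirish uchun mavjudligini tekshiramiz
--             if (txt[i] in vowels) or (i + 1 < len(txt) and txt[i + 1] == '_'):
--                 pass  # Underscore ni hozircha qo‘shmaymiz
--             elif i + 1 < len(txt):  # So‘ngida underscore qo‘shilmasligi uchun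
--                 result += '_'
--             count = 0  # Sanashni qayta boshlaymiz
--         i += 1
--
--     return result
-- ===== SOURCE B (Python) =====
-- def insert_underscore(txt):
--     vowels = 'aeiouAEIOU'
--     parts = []
--     for start in range(0, len(txt), 3):
--         chunk = txt[start:start + 3]
--         parts.append(chunk)
--         if len(chunk) == 3 and start + 3 < len(txt) and chunk[2] not in vowels and txt[start + 3] != '_':
--             parts.append('_')
--     return ''.join(parts)
-- ===== Notes on version B (the rewrite author's own statement) =====
-- stated objective: faster
-- what changed: Replaced A's char-by-char while loop (counter resetting every third character, quadratic string += accumulation) with a loop over 3-character chunks via range(0, len, 3) that collects pieces in a list and joins once.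
import Mathlib
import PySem

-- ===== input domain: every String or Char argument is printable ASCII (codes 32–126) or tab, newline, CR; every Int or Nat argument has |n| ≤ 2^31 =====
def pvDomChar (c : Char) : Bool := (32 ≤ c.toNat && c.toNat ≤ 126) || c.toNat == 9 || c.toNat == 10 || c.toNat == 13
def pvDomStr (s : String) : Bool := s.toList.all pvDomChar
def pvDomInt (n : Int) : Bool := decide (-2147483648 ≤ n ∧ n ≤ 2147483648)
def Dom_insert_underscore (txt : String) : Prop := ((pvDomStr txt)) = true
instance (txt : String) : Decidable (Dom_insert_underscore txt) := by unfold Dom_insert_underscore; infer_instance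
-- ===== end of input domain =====

-- B replaces A's char-by-char while loop with a counter that resets every third character
-- by a loop over 3-character chunks (range(0, len, 3)) collecting pieces into a joined list.

def pvVowels : List Char := "aeiouAEIOU".toList

-- ===== PORT A =====
-- A's while loop over i walks txt left to right; transliterated as recursion on the
-- remaining characters: 'i < len(txt)' = rest nonempty, txt[i] = head, txt[i+1] = head of tail.
def insert_underscore_loop (rest : List Char) (count : Int) (result : List Char) : List Char :=
  match rest with
  | [] => result
  | c :: rs =>
    let result := result ++ [c]
    let count := count + 1
    if count = 3 then
      if c ∈ pvVowels ∨ rs.head? = some '_' then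
        insert_underscore_loop rs 0 result
      else if rs ≠ [] then
        insert_underscore_loop rs 0 (result ++ ['_'])
      else
        insert_underscore_loop rs 0 result
    else
      insert_underscore_loop rs count result

def insert_underscore (txt : String) : String :=
  String.ofList (insert_underscore_loop txt.toList 0 [])

-- ===== PORT B =====
-- loop body of Source B's 'for start in range(0, len(txt), 3)': append chunk, maybe append '_'
def insert_underscore_step (s : List Char) (n : Int) (parts : List (List Char)) (start : Int) : List (List Char) :=
  let chunk := PySem.List.slice s (some start) (some (start + 3))
  let parts := parts ++ [chunk]
  if chunk.length = 3 ∧ start + 3 < n ∧ chunk.getD 2 ' ' ∉ pvVowels ∧ PySem.List.pyGetD s (start + 3) ' ' ≠ '_' then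
    parts ++ [['_']]
  else
    parts

def insert_underscore_alt (txt : String) : String :=
  let s := txt.toList
  let n : Int := (s.length : Int)
  String.ofList ((PySem.List.pyRange 0 n 3).foldl (insert_underscore_step s n) []).flatten

-- ===== PRECONDITION & SPEC =====
def Spec_insert_underscore (txt : String) (out : String) : Prop := out = insert_underscore_alt txt
instance (txt : String) (out : String) : Decidable (Spec_insert_underscore txt out) := by unfold Spec_insert_underscore; infer_instance

-- ===== CLAIM (what is proved, stated in full; the proofs are below) =====
def Claim_equal_insert_underscore : Prop := ∀ (txt : String), Dom_insert_underscore txt → Spec_insert_underscore txt (insert_underscore txt)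

-- ===== LEMMAS AND PROOFS =====

-- proof-only reference function: both ports are shown equal to this chunked recursion
def pvGo (s : List Char) : List Char :=
  if _h : s.length ≤ 3 then s
  else
    s.take 3 ++
      (if s.getD 2 ' ' ∈ pvVowels ∨ s.getD 3 ' ' = '_' then [] else ['_']) ++
      pvGo (s.drop 3)
termination_by s.length
decreasing_by simp; omega

-- A's loop, entered with count = 0, appends pvGo's result to the accumulator.
theorem insert_underscore_loop_eq (s acc : List Char) :
    insert_underscore_loop s 0 acc = acc ++ pvGo s := by
  induction s using pvGo.induct generalizing acc with
  | case1 s h =>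
    rw [pvGo, dif_pos h]
    match s, h with
    | [], _ => simp [insert_underscore_loop]
    | [a], _ => simp [insert_underscore_loop]
    | [a, b], _ => simp [insert_underscore_loop]
    | [a, b, c], _ =>
      simp only [insert_underscore_loop]
      norm_num
  | case2 s h ih =>
    rw [pvGo, dif_neg h]
    match s, h, ih with
    | [], h, _ => simp at h
    | [a], h, _ => simp at h
    | [a, b], h, _ => simp at h
    | [a, b, c], h, _ => simp at h
    | a :: b :: c :: d :: rs, h, ih =>
      rw [insert_underscore_loop]; norm_num
      rw [insert_underscore_loop]; norm_num
      rw [insert_underscore_loop]; norm_num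
      simp only [List.drop_succ_cons, List.drop_zero] at ih
      by_cases hv : c ∈ pvVowels ∨ d = '_'
      · rw [if_pos hv, if_pos hv, ih]; simp
      · rw [if_neg hv, if_neg (by simp : ¬ d :: rs = []), if_neg hv, ih]; simp

-- unfolding a step-3 range once
theorem pvRange_three_cons (a b : Int) (hab : a < b) :
    PySem.List.pyRange a b 3 = a :: PySem.List.pyRange (a + 3) b 3 := by
  rw [PySem.List.pyRange_of_pos a b (by norm_num), PySem.List.pyRange_of_pos (a + 3) b (by norm_num)]
  rw [if_pos hab]
  by_cases h3 : a + 3 < b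
  · rw [if_pos h3]
    have hm : ((b - a + 3 - 1) / 3).toNat = ((b - (a + 3) + 3 - 1) / 3).toNat + 1 := by omega
    rw [hm, List.range_succ_eq_map]
    simp only [List.map_cons, List.map_map]
    congr 1
    · norm_num
    · apply List.map_congr_left
      intro k _
      simp [Function.comp]
      ring
  · rw [if_neg h3]
    have hm : ((b - a + 3 - 1) / 3).toNat = 1 := by omega
    rw [hm]
    simp

-- B's fold over range(start, len, 3), flattened, appends pvGo of the remaining suffix.
theorem insert_underscore_fold_eq (s : List Char) (k : Nat) :
    ∀ (start : Nat), s.length - start ≤ k → ∀ (parts : List (List Char)),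
      ((PySem.List.pyRange (start : Int) (s.length : Int) 3).foldl
          (insert_underscore_step s (s.length : Int)) parts).flatten
        = parts.flatten ++ pvGo (s.drop start) := by
  induction k with
  | zero =>
    intro start hs parts
    have hge : s.length ≤ start := by omega
    rw [PySem.List.pyRange_of_pos _ _ (by norm_num : (0:Int) < 3),
        if_neg (by exact_mod_cast not_lt.mpr hge)]
    rw [List.drop_eq_nil_of_le hge]
    simp [pvGo]
  | succ k ih =>
    intro start hs parts
    by_cases hlt : start < s.length
    · rw [pvRange_three_cons _ _ (by exact_mod_cast hlt)]
      rw [List.foldl_cons]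
      have hcast : ((start : Int) + 3) = ((start + 3 : Nat) : Int) := by push_cast; ring
      rw [hcast, ih (start + 3) (by omega)]
      -- now analyse one step
      set r := s.drop start with hr
      have hrlen : r.length = s.length - start := by simp [hr]
      have hchunk : PySem.List.slice s (some (start : Int)) (some ((start + 3 : Nat) : Int)) = r.take 3 := by
        have : ((start + 3 : Nat) : Int) = ((start : Nat) : Int) + ((3 : Nat) : Int) := by push_cast; ring
        rw [this, PySem.List.slice_natCast_add]
      have hdrop : s.drop (start + 3) = r.drop 3 := by
        rw [hr, List.drop_drop]
      rw [hdrop]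
      simp only [insert_underscore_step]
      rw [hcast, hchunk]
      by_cases h3 : 3 < r.length
      · -- full chunk with a following character
        have htake : (r.take 3).length = 3 := by simp; omega
        have hnext : PySem.List.pyGetD s ((start + 3 : Nat) : Int) ' ' = r.getD 3 ' ' := by
          rw [PySem.List.pyGetD_natCast]
          rw [hr]
          simp [List.getD, List.getElem?_drop]
        have hmid : (r.take 3).getD 2 ' ' = r.getD 2 ' ' := by
          simp [List.getD]
        conv_rhs => rw [pvGo]
        rw [dif_neg (by omega : ¬ r.length ≤ 3), hnext, hmid]
        by_cases hv : r.getD 2 ' ' ∈ pvVowels ∨ r.getD 3 ' ' = '_'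
        · rw [if_neg (by push Not; intro _ _; tauto), if_pos hv]
          simp
        · push_neg at hv
          rw [if_pos ⟨htake, by exact_mod_cast (by omega : start + 3 < s.length), hv.1, hv.2⟩,
              if_neg (by tauto)]
          simp
      · -- short remainder (length ≤ 3): no separator, chunk is the whole remainder
        have htail : r.take 3 = r := List.take_of_length_le (by omega)
        have hfalse : ¬ ((r.take 3).length = 3 ∧ ((start + 3 : Nat) : Int) < (s.length : Int) ∧
            (r.take 3).getD 2 ' ' ∉ pvVowels ∧ PySem.List.pyGetD s ((start + 3 : Nat) : Int) ' ' ≠ '_') := by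
          rintro ⟨h1, h2, -, -⟩
          rw [htail] at h1
          have : start + 3 < s.length := by exact_mod_cast h2
          omega
        rw [if_neg hfalse, htail]
        have hnil : r.drop 3 = [] := List.drop_eq_nil_of_le (by omega)
        rw [hnil]
        conv_rhs => rw [pvGo]
        rw [dif_pos (by omega : r.length ≤ 3)]
        simp [pvGo]
    · -- start ≥ length: empty range
      rw [PySem.List.pyRange_of_pos _ _ (by norm_num : (0:Int) < 3),
          if_neg (by exact_mod_cast hlt)]
      rw [List.drop_eq_nil_of_le (by omega)]
      simp [pvGo]

-- ===== VERDICT (by name: the statement is the Claim_ definition above) =====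
theorem insert_underscore_spec : Claim_equal_insert_underscore := by
  intro txt _
  show _ = _
  unfold insert_underscore insert_underscore_alt
  rw [insert_underscore_loop_eq]
  have := insert_underscore_fold_eq txt.toList txt.toList.length 0 (by omega) []
  simp only [Nat.cast_zero] at this ⊢
  rw [this]
  simp
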